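-- pv_equiv track=rewrite | github.com/ROMANVIKI/DSA | Leetcode/random-problemsets/total_char_str_trans.py | lengthAfterTransformation
-- ===== SOURCE A (Python) =====
-- def lengthAfterTransformation(s, t, nums):
--     alpha_dict = {"a": 0, "b": 1, "c": 2, "d": 3, "e": 4, "f": 5, "g": 6, "h": 7, "i": 8, "j": 9, "k": 10, "l": 11, "m": 12, "n": 13, "o": 14, "p": 15, "q": 16, "r": 17, "s": 18, "t": 19, "u": 20, "v": 21, "w": 22, "x": 23, "y": 24, "z": 25}
--     rev_alpha = {v:k for k, v in alpha_dict.items()}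
--     sol_str = []
--
--     for i in range(t):
--         for k in s:
--             original_pos = alpha_dict[k]
--             shift = nums[original_pos]
--             new_pos = (original_pos + shift) % 26
--             sol_str.append(rev_alpha[new_pos])
--
--     return ''.join(sol_str)
-- ===== SOURCE B (Python) =====
-- def lengthAfterTransformation(s, t, nums):
--     if t <= 0:
--         return ''
--     transformed = ''.join(chr((ord(c) - 97 + nums[ord(c) - 97]) % 26 + 97) for c in s)
--     return transformed * t
-- ===== Notes on version B (the rewrite author's own statement) =====
-- stated objective: simpler
-- what changed: B replaces A's per-character dict lookups inside a nested t-by-len(s) append loop with one ord/chr-arithmetic pass over s, then repeats the transformed string with string multiplication; t<=0 short-circuits to ''.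
import Mathlib
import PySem

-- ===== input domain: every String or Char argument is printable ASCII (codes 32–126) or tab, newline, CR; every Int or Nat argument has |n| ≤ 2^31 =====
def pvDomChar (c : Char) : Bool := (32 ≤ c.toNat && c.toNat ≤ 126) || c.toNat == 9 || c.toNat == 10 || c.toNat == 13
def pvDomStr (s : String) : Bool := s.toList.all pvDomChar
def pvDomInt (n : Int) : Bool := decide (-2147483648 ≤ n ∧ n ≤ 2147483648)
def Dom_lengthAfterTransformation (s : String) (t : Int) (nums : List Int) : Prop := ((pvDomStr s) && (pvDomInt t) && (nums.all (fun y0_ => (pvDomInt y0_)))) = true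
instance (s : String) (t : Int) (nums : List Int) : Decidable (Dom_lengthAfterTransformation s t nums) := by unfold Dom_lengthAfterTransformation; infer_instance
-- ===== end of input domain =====

-- B replaces A's dict lookups and nested t-by-|s| append loop by one ord/chr arithmetic pass
-- over s followed by string repetition (objective: simpler). Equivalence is on the return value.

-- ===== PORT A =====
-- alpha_dict = {"a": 0, …, "z": 25}
def pvAlphaDict : PySem.Dict String Int := PySem.Dict.ofList
  [("a", 0), ("b", 1), ("c", 2), ("d", 3), ("e", 4), ("f", 5), ("g", 6), ("h", 7), ("i", 8),
   ("j", 9), ("k", 10), ("l", 11), ("m", 12), ("n", 13), ("o", 14), ("p", 15), ("q", 16),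
   ("r", 17), ("s", 18), ("t", 19), ("u", 20), ("v", 21), ("w", 22), ("x", 23), ("y", 24), ("z", 25)]

-- rev_alpha = {v: k for k, v in alpha_dict.items()}
def pvRevAlpha : PySem.Dict Int String :=
  pvAlphaDict.items.foldl (fun d kv => d.insert kv.2 kv.1) PySem.Dict.empty

-- lookups total via getD; Pre_ guarantees they succeed (KeyError/IndexError excluded there)
def lengthAfterTransformation (s : String) (t : Int) (nums : List Int) : String :=
  let solStr : List String :=
    (PySem.List.pyRange 0 t 1).foldl (fun acc _i =>
      s.toList.foldl (fun acc2 k =>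
        let originalPos := pvAlphaDict.getD (String.singleton k) 0
        let shift := PySem.List.pyGetD nums originalPos 0
        let newPos := PySem.Int.mod (originalPos + shift) 26
        acc2 ++ [pvRevAlpha.getD newPos ""]) acc) []
  PySem.Str.join "" solStr

-- ===== PORT B =====
-- chr((ord(c) - 97 + nums[ord(c) - 97]) % 26 + 97)
def pvShiftChar (nums : List Int) (c : Char) : Char :=
  Char.ofNat ((PySem.Int.mod ((c.toNat : Int) - 97 + PySem.List.pyGetD nums ((c.toNat : Int) - 97) 0) 26 + 97).toNat)

def lengthAfterTransformation_alt (s : String) (t : Int) (nums : List Int) : String :=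
  if t ≤ 0 then ""
  else
    let transformed : List Char := s.toList.map (pvShiftChar nums)
    String.ofList (List.replicate t.toNat transformed).flatten

-- ===== PRECONDITION & SPEC =====
-- Pre_ excludes exactly the inputs where A raises: for t ≥ 1, a character of s that is not a
-- lowercase letter (KeyError) or whose alphabet position is ≥ len(nums) (IndexError).
def Pre_lengthAfterTransformation (s : String) (t : Int) (nums : List Int) : Prop :=
  t ≤ 0 ∨ (s.toList.all (fun c => 97 ≤ c.toNat && c.toNat ≤ 122 && c.toNat - 97 < nums.length)) = true
instance (s : String) (t : Int) (nums : List Int) : Decidable (Pre_lengthAfterTransformation s t nums) := by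
  unfold Pre_lengthAfterTransformation; infer_instance

def pvWitness_lengthAfterTransformation : String × Int × List Int := ("ab", 2, [1, 27])

def Spec_lengthAfterTransformation (s : String) (t : Int) (nums : List Int) (out : String) : Prop := out = lengthAfterTransformation_alt s t nums
instance (s : String) (t : Int) (nums : List Int) (out : String) : Decidable (Spec_lengthAfterTransformation s t nums out) := by unfold Spec_lengthAfterTransformation; infer_instance

-- ===== CLAIM (what is proved, stated in full; the proofs are below) =====
def Claim_equal_lengthAfterTransformation : Prop := ∀ (s : String) (t : Int) (nums : List Int), Dom_lengthAfterTransformation s t nums → Pre_lengthAfterTransformation s t nums → Spec_lengthAfterTransformation s t nums (lengthAfterTransformation s t nums)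

-- ===== LEMMAS AND PROOFS =====

-- A's alpha_dict lookup of a lowercase letter is its alphabet position.
theorem pvAlpha_getD (c : Char) (h1 : 97 ≤ c.toNat) (h2 : c.toNat ≤ 122) :
    pvAlphaDict.getD (String.singleton c) 0 = (c.toNat : Int) - 97 := by
  have hc : Char.ofNat c.toNat = c := Char.ofNat_toNat c
  rw [← hc]
  interval_cases h : c.toNat <;> decide

-- A's rev_alpha lookup of n ∈ [0, 26) is the singleton of the n-th letter.
theorem pvRev_getD (n : Int) (h1 : 0 ≤ n) (h2 : n < 26) :
    pvRevAlpha.getD n "" = String.singleton (Char.ofNat (n.toNat + 97)) := by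
  interval_cases n <;> decide

-- One character of A's inner loop equals the singleton of B's shifted character.
theorem pvChar_eq (nums : List Int) (c : Char) (h1 : 97 ≤ c.toNat) (h2 : c.toNat ≤ 122) :
    pvRevAlpha.getD
      (PySem.Int.mod (pvAlphaDict.getD (String.singleton c) 0 +
        PySem.List.pyGetD nums (pvAlphaDict.getD (String.singleton c) 0) 0) 26) "" =
    String.singleton (pvShiftChar nums c) := by
  rw [pvAlpha_getD c h1 h2]
  set m := PySem.Int.mod ((c.toNat : Int) - 97 + PySem.List.pyGetD nums ((c.toNat : Int) - 97) 0) 26 with hm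
  have hlo : 0 ≤ m := PySem.Int.mod_nonneg _ (by norm_num)
  have hhi : m < 26 := PySem.Int.mod_lt _ (by norm_num)
  rw [pvRev_getD m hlo hhi]
  unfold pvShiftChar
  rw [← hm]
  have h97 : (m + 97).toNat = m.toNat + 97 := by omega
  rw [h97]

-- The outer loop appends the same block once per range element.
theorem pvFold_const_append {α β : Type} (blk : List α) (l : List β) (acc : List α) :
    l.foldl (fun a _ => a ++ blk) acc = acc ++ (List.replicate l.length blk).flatten := by
  induction l generalizing acc with
  | nil => simp
  | cons x xs ih => simp [List.foldl, ih, List.replicate_succ, List.append_assoc]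

theorem lengthAfterTransformation_spec_aux (s : String) (t : Int) (nums : List Int)
    (hpre : Pre_lengthAfterTransformation s t nums) :
    lengthAfterTransformation s t nums = lengthAfterTransformation_alt s t nums := by
  by_cases ht : t ≤ 0
  · -- range(t) is empty; B returns "" immediately
    unfold lengthAfterTransformation lengthAfterTransformation_alt
    rw [PySem.List.pyRange_one_eq_nil (by omega)]
    simp [ht]
    decide
  · rcases hpre with h | hch
    · exact absurd h ht
    simp only [List.all_eq_true, Bool.and_eq_true, decide_eq_true_eq] at hch
    unfold lengthAfterTransformation lengthAfterTransformation_alt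
    simp only [if_neg ht]
    -- inner loop: one pass over s, appending singleton strings
    have hinner : ∀ acc : List String,
        s.toList.foldl (fun acc2 k =>
          acc2 ++ [pvRevAlpha.getD
            (PySem.Int.mod (pvAlphaDict.getD (String.singleton k) 0 +
              PySem.List.pyGetD nums (pvAlphaDict.getD (String.singleton k) 0) 0) 26) ""]) acc
        = acc ++ (s.toList.map (pvShiftChar nums)).map String.singleton := by
      intro acc
      rw [PySem.List.foldl_append_singleton_eq_map]
      rw [List.map_map]
      congr 1
      apply List.map_congr_left
      intro c hc
      exact pvChar_eq nums c (hch c hc).1.1 (hch c hc).1.2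
    have houter := pvFold_const_append
      ((s.toList.map (pvShiftChar nums)).map String.singleton) (PySem.List.pyRange 0 t 1)
      ([] : List String)
    -- rewrite A's nested fold into replicate/flatten form
    have hA : (PySem.List.pyRange 0 t 1).foldl (fun acc _i =>
        s.toList.foldl (fun acc2 k =>
          acc2 ++ [pvRevAlpha.getD
            (PySem.Int.mod (pvAlphaDict.getD (String.singleton k) 0 +
              PySem.List.pyGetD nums (pvAlphaDict.getD (String.singleton k) 0) 0) 26) ""]) acc) []
        = (List.replicate t.toNat ((s.toList.map (pvShiftChar nums)).map String.singleton)).flatten := by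
      have := PySem.List.foldl_congr_mem (PySem.List.pyRange 0 t 1)
        (fun acc _i =>
          s.toList.foldl (fun acc2 k =>
            acc2 ++ [pvRevAlpha.getD
              (PySem.Int.mod (pvAlphaDict.getD (String.singleton k) 0 +
                PySem.List.pyGetD nums (pvAlphaDict.getD (String.singleton k) 0) 0) 26) ""]) acc)
        (fun acc _i => acc ++ (s.toList.map (pvShiftChar nums)).map String.singleton)
        [] (fun acc _x _hx => hinner acc)
      rw [this, houter]
      simp [PySem.List.length_pyRange_one]
    rw [hA]
    -- join of singleton strings is String.mk of the character list
    have hflat : (List.replicate t.toNat ((s.toList.map (pvShiftChar nums)).map String.singleton)).flatten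
        = (List.replicate t.toNat (s.toList.map (pvShiftChar nums))).flatten.map String.singleton := by
      rw [← List.map_replicate, List.map_flatten]
    rw [hflat]
    apply String.toList_inj.mp
    rw [PySem.Str.toList_join]
    simp only [List.map_map]
    have hcomp : (String.toList ∘ String.singleton) = fun c => [c] := by
      funext c; simp
    rw [show ("" : String).toList = [] from rfl, hcomp]
    rw [PySem.Chars.join_nil_singletons]
    simp

-- ===== VERDICT (by name: the statement is the Claim_ definition above) =====
theorem lengthAfterTransformation_spec : Claim_equal_lengthAfterTransformation := by
  intro s t nums _ hpre
  unfold Spec_lengthAfterTransformation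
  exact lengthAfterTransformation_spec_aux s t nums hpre
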